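-- pv_equiv track=rewrite | github.com/LucilleN/condescension-empowerment | preprocess_reddit_data.py | contains_2nd_person_pronouns
-- ===== SOURCE A (Python) =====
-- def contains_2nd_person_pronouns(tokens):
--     pronouns = [
--         "you",
--         "your",
--         "youre",
--         "you're",
--         "yall",
--         "y'all",
--         "u",
--         "ur"
--     ]
--     for pronoun in pronouns:
--         if pronoun in tokens:
--             return True
--     return False
-- ===== SOURCE B (Python) =====
-- PRONOUNS = {"you", "your", "youre", "you're", "yall", "y'all", "u", "ur"}
--
-- def contains_2nd_person_pronouns(tokens):
--     return any(tok in PRONOUNS for tok in tokens)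
-- ===== Notes on version B (the rewrite author's own statement) =====
-- stated objective: idiomatic
-- what changed: Iterates over the tokens once, probing a fixed pronoun set, instead of scanning the token list once per pronoun.
import Mathlib
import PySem

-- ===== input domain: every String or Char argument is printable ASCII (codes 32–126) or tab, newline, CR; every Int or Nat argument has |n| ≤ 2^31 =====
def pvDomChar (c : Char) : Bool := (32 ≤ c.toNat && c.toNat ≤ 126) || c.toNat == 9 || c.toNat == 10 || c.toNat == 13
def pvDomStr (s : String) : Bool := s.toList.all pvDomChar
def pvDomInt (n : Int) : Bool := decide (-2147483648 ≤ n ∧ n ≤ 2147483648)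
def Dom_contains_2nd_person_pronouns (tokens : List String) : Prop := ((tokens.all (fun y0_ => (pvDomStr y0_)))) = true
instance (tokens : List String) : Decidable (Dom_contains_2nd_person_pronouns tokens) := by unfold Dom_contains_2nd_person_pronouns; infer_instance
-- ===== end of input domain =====

-- B loops over the tokens once probing a fixed pronoun set instead of scanning the token list once per pronoun (idiomatic; same result).

-- ===== PORT A =====
-- A's pronoun list, in its order.
def pvPronounList : List String :=
  ["you", "your", "youre", "you're", "yall", "y'all", "u", "ur"]

-- A: for pronoun in pronouns: if pronoun in tokens: return True; return False.
def pvLoopA (tokens : List String) : List String → Bool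
  | [] => false
  | pronoun :: rest => if pronoun ∈ tokens then true else pvLoopA tokens rest

def contains_2nd_person_pronouns (tokens : List String) : Bool :=
  pvLoopA tokens pvPronounList

-- ===== PORT B =====
-- B's pronoun set (PySem.Set of the distinct literals).
def pvPronounSet : PySem.Set String :=
  PySem.Set.ofList ["you", "your", "youre", "you're", "yall", "y'all", "u", "ur"]

-- B: any(tok in PRONOUNS for tok in tokens).
def contains_2nd_person_pronouns_alt (tokens : List String) : Bool :=
  tokens.any (fun tok => tok ∈ pvPronounSet)

-- ===== PRECONDITION & SPEC =====
def Spec_contains_2nd_person_pronouns (tokens : List String) (out : Bool) : Prop := out = contains_2nd_person_pronouns_alt tokens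
instance (tokens : List String) (out : Bool) : Decidable (Spec_contains_2nd_person_pronouns tokens out) := by unfold Spec_contains_2nd_person_pronouns; infer_instance

-- ===== CLAIM (what is proved, stated in full; the proofs are below) =====
def Claim_equal_contains_2nd_person_pronouns : Prop := ∀ (tokens : List String), Dom_contains_2nd_person_pronouns tokens → Spec_contains_2nd_person_pronouns tokens (contains_2nd_person_pronouns tokens)

-- ===== LEMMAS AND PROOFS =====

-- A's loop returns true iff some pronoun of the list occurs in tokens.
theorem pvLoopA_eq_any (tokens : List String) (ps : List String) :
    pvLoopA tokens ps = ps.any (fun p => p ∈ tokens) := by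
  induction ps with
  | nil => rfl
  | cons p rest ih =>
      by_cases h : p ∈ tokens <;> simp [pvLoopA, List.any_cons, ih, h]

-- The pronoun literals are distinct, so the set built from them is the list itself.
theorem pvSet_eq_list : pvPronounSet = pvPronounList := by decide

-- ===== VERDICT (by name: the statement is the Claim_ definition above) =====
theorem contains_2nd_person_pronouns_spec : Claim_equal_contains_2nd_person_pronouns := by
  intro tokens _
  unfold Spec_contains_2nd_person_pronouns
  unfold contains_2nd_person_pronouns contains_2nd_person_pronouns_alt
  rw [pvLoopA_eq_any, pvSet_eq_list, Bool.eq_iff_iff]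
  simp only [List.any_eq_true, decide_eq_true_eq]
  exact ⟨fun ⟨p, hp, ht⟩ => ⟨p, ht, hp⟩, fun ⟨t, ht, hp⟩ => ⟨t, hp, ht⟩⟩
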